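-- pv_equiv track=rewrite | github.com/arXiv/submission-tools | preflight_parser/preflight_parser/__init__.py | compiler_string_to_types
-- ===== SOURCE A (Python) =====
-- from enum import Enum
--
-- class LanguageType(str, Enum):
--     r"""Possible language types of a submission/file.
--
--     TEX does not allow compiling as latex, e.g., because it contains \bye
--     LATEX does not allow compiling as plain tex, e.g., because it contains \documentclass
--     UNKNOWN allows compilation as either TEX or LATEX.
--     """
--
--     unknown = "unknown"
--     tex = "tex"
--     latex = "latex"
--
-- class EngineType(str, Enum):
--     """Possible engines in use."""
--
--     unknown = "unknown"
--     tex = "tex"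
--     luatex = "luatex"
--     xetex = "xetex"
--     ptex = "ptex"
--     uptex = "uptex"
--
-- class OutputType(str, Enum):
--     """Possible output types of the first run."""
--
--     unknown = "unknown"
--     dvi = "dvi"
--     pdf = "pdf"
--
-- class PostProcessType(str, Enum):
--     """Possible conversion types from dvi to pdf."""
--
--     unknown = "unknown"
--     none = "none"
--     dvips_ps2pdf = "dvips_ps2pdf"
--     dvipdfmx = "dvipdfmx"
--
-- COMPILER_SELECTION = {
--     LanguageType.tex: {
--         OutputType.dvi: {
--             EngineType.tex: "etex",
--             EngineType.luatex: "dviluatex",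
--             # not eaasy to do: EngineType.XETEX: "xetex",
--             EngineType.ptex: "ptex",
--             EngineType.uptex: "uptex",
--         },
--         OutputType.pdf: {
--             EngineType.tex: "pdfetex",
--             EngineType.luatex: "luatex",
--             EngineType.xetex: "xetex",
--             # EngineType.PTEX: "ptex",
--             # EngineType.UPTEX: "uptex",
--         },
--     },
--     LanguageType.latex: {
--         OutputType.dvi: {
--             EngineType.tex: "latex",
--             EngineType.luatex: "dvilualatex",
--             # not eaasy to do: EngineType.XETEX: "xetex",
--             EngineType.ptex: "platex",
--             EngineType.uptex: "uplatex",
--         },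
--         OutputType.pdf: {
--             EngineType.tex: "pdflatex",
--             EngineType.luatex: "lualatex",
--             EngineType.xetex: "xelatex",
--             # EngineType.PTEX: "ptex",
--             # EngineType.UPTEX: "uptex",
--         },
--     },
-- }
--
-- def compiler_string_to_types(compiler: str) -> tuple[LanguageType, OutputType, EngineType, PostProcessType]:
--     """Convert compiler string to Language/Output/Engine/PostProcess types."""
--     ret_l: LanguageType = LanguageType.unknown
--     ret_o: OutputType = OutputType.unknown
--     ret_e: EngineType = EngineType.unknown
--     ret_p: PostProcessType = PostProcessType.unknown
--     parts = compiler.split("+", 1)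
--     comp: str = ""
--     if len(parts) == 2:
--         comp, postp = parts
--         for pp in PostProcessType:
--             if str(pp) == postp:
--                 ret_p = pp
--                 break
--     else:
--         comp = parts[0]
--         ret_p = PostProcessType.none
--     for lang in COMPILER_SELECTION:
--         for outp in COMPILER_SELECTION[lang]:
--             for eng in COMPILER_SELECTION[lang][outp]:
--                 if comp == COMPILER_SELECTION[lang][outp][eng]:
--                     ret_l = lang
--                     ret_o = outp
--                     ret_e = eng
--                     break
--     return ret_l, ret_o, ret_e, ret_p
-- ===== SOURCE B (Python) =====
-- from enum import Enum
--
--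
-- class LanguageType(str, Enum):
--     unknown = "unknown"
--     tex = "tex"
--     latex = "latex"
--
--
-- class EngineType(str, Enum):
--     unknown = "unknown"
--     tex = "tex"
--     luatex = "luatex"
--     xetex = "xetex"
--     ptex = "ptex"
--     uptex = "uptex"
--
--
-- class OutputType(str, Enum):
--     unknown = "unknown"
--     dvi = "dvi"
--     pdf = "pdf"
--
--
-- class PostProcessType(str, Enum):
--     unknown = "unknown"
--     none = "none"
--     dvips_ps2pdf = "dvips_ps2pdf"
--     dvipdfmx = "dvipdfmx"
--
--
-- # Flat reverse index of COMPILER_SELECTION: compiler name -> (language, output, engine).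
-- _COMPILER_INDEX = {
--     "etex": (LanguageType.tex, OutputType.dvi, EngineType.tex),
--     "dviluatex": (LanguageType.tex, OutputType.dvi, EngineType.luatex),
--     "ptex": (LanguageType.tex, OutputType.dvi, EngineType.ptex),
--     "uptex": (LanguageType.tex, OutputType.dvi, EngineType.uptex),
--     "pdfetex": (LanguageType.tex, OutputType.pdf, EngineType.tex),
--     "luatex": (LanguageType.tex, OutputType.pdf, EngineType.luatex),
--     "xetex": (LanguageType.tex, OutputType.pdf, EngineType.xetex),
--     "latex": (LanguageType.latex, OutputType.dvi, EngineType.tex),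
--     "dvilualatex": (LanguageType.latex, OutputType.dvi, EngineType.luatex),
--     "platex": (LanguageType.latex, OutputType.dvi, EngineType.ptex),
--     "uplatex": (LanguageType.latex, OutputType.dvi, EngineType.uptex),
--     "pdflatex": (LanguageType.latex, OutputType.pdf, EngineType.tex),
--     "lualatex": (LanguageType.latex, OutputType.pdf, EngineType.luatex),
--     "xelatex": (LanguageType.latex, OutputType.pdf, EngineType.xetex),
-- }
--
-- _UNKNOWN_LOE = (LanguageType.unknown, OutputType.unknown, EngineType.unknown)
--
-- # Postprocess suffix -> member, keyed by the member's VALUE (the intended spelling).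
-- _POSTPROCESS_INDEX = {pp.value: pp for pp in PostProcessType}
--
--
-- def compiler_string_to_types(compiler: str) -> tuple[LanguageType, OutputType, EngineType, PostProcessType]:
--     """Convert compiler string to Language/Output/Engine/PostProcess types."""
--     parts = compiler.split("+", 1)
--     if len(parts) == 2:
--         ret_p = _POSTPROCESS_INDEX.get(parts[1], PostProcessType.unknown)
--     else:
--         ret_p = PostProcessType.none
--     ret_l, ret_o, ret_e = _COMPILER_INDEX.get(parts[0], _UNKNOWN_LOE)
--     return ret_l, ret_o, ret_e, ret_p
-- ===== Notes on version B (the rewrite author's own statement) =====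
-- stated objective: simpler
-- what changed: Replaces A's triple-nested scan of COMPILER_SELECTION with one lookup in a flat reverse-index dict (compiler name -> (language, output, engine)) and A's postprocess enum loop with a dict keyed by the member value.
-- intended difference: On inputs 'comp+suffix' whose suffix is 'none', 'dvips_ps2pdf', 'dvipdfmx' or 'PostProcessType.' plus one of those, A's comparison str(pp) == postp (str(pp) is 'PostProcessType.<name>' for a str-mixin Enum) returns PostProcessType.unknown for the documented value spellings and matches the accidental 'PostProcessType.<name>' spellings instead, while B matches the member value, which is the intended spelling (e.g. 'etex+none': A gives unknown, B gives none). — e.g. on compiler_string_to_types("etex+none"): A returns ("tex", "dvi", "tex", "unknown"), B returns ("tex", "dvi", "tex", "none")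
import Mathlib
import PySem

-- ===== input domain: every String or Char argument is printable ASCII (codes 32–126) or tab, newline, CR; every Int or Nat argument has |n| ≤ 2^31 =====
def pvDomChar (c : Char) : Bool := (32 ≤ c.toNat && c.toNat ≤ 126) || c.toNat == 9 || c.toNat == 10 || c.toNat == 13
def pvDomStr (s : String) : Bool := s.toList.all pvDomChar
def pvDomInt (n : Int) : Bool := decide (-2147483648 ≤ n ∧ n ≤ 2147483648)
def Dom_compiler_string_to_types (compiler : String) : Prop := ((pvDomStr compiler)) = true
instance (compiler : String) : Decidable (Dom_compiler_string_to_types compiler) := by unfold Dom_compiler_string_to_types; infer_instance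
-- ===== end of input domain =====

-- B replaces A's triple-nested scan of COMPILER_SELECTION by a flat reverse-index dict and the
-- postprocess enum loop by a dict keyed by the member VALUE (simpler; and B matches the intended
-- suffix spelling where A's `str(pp)` comparison does not — see D_ below).

-- ===== PORT A =====
-- `str(pp)` for a member of `class PostProcessType(str, Enum)` under the repository's Python
-- (3.11) is "PostProcessType.<name>", not the value; A's loop pairs are precomputed here as
-- (str(pp), pp.value) — exact for this module.  Enum members are ported as their value strings.
def ppTableA : List (String × String) :=
  [("PostProcessType.unknown", "unknown"), ("PostProcessType.none", "none"),
   ("PostProcessType.dvips_ps2pdf", "dvips_ps2pdf"), ("PostProcessType.dvipdfmx", "dvipdfmx")]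

-- `for pp in PostProcessType: if str(pp) == postp: ret_p = pp; break`  (ret_p starts unknown)
def ppLoopA (postp : String) : List (String × String) → String
  | [] => "unknown"
  | (s, v) :: rest => if s = postp then v else ppLoopA postp rest

-- COMPILER_SELECTION, in A's iteration order
def tableA : List (String × List (String × List (String × String))) :=
  [("tex",
     [("dvi", [("tex", "etex"), ("luatex", "dviluatex"), ("ptex", "ptex"), ("uptex", "uptex")]),
      ("pdf", [("tex", "pdfetex"), ("luatex", "luatex"), ("xetex", "xetex")])]),
   ("latex",
     [("dvi", [("tex", "latex"), ("luatex", "dvilualatex"), ("ptex", "platex"), ("uptex", "uplatex")]),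
      ("pdf", [("tex", "pdflatex"), ("luatex", "lualatex"), ("xetex", "xelatex")])])]

-- innermost `for eng …: if comp == …: ret_l, ret_o, ret_e = …; break` (break leaves this loop only)
def engLoopA (comp lang outp : String) : List (String × String) → String × String × String → String × String × String
  | [], st => st
  | (eng, name) :: rest, st => if comp = name then (lang, outp, eng) else engLoopA comp lang outp rest st

def outLoopA (comp lang : String) : List (String × List (String × String)) → String × String × String → String × String × String
  | [], st => st
  | (outp, engs) :: rest, st => outLoopA comp lang rest (engLoopA comp lang outp engs st)

def langLoopA (comp : String) : List (String × List (String × List (String × String))) → String × String × String → String × String × String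
  | [], st => st
  | (lang, outs) :: rest, st => langLoopA comp rest (outLoopA comp lang outs st)

def compiler_string_to_types (compiler : String) : String × String × String × String :=
  -- parts = compiler.split("+", 1); sep ≠ "" so splitMax? is never none
  match (PySem.Str.splitMax? compiler "+" 1).getD [] with
  | [comp, postp] =>
      let retP := ppLoopA postp ppTableA
      let st := langLoopA comp tableA ("unknown", "unknown", "unknown")
      (st.1, st.2.1, st.2.2, retP)
  | parts =>  -- len(parts) != 2: comp = parts[0] (split never returns [], so headD's default is dead)
      let st := langLoopA (parts.headD "") tableA ("unknown", "unknown", "unknown")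
      (st.1, st.2.1, st.2.2, "none")

-- ===== PORT B =====
-- _COMPILER_INDEX: flat reverse index, compiler name -> (language, output, engine)
def compilerIndexB : PySem.Dict String (String × String × String) :=
  PySem.Dict.mk   -- dict literal with distinct keys: the association list as written
    [("etex", ("tex", "dvi", "tex")), ("dviluatex", ("tex", "dvi", "luatex")),
     ("ptex", ("tex", "dvi", "ptex")), ("uptex", ("tex", "dvi", "uptex")),
     ("pdfetex", ("tex", "pdf", "tex")), ("luatex", ("tex", "pdf", "luatex")),
     ("xetex", ("tex", "pdf", "xetex")), ("latex", ("latex", "dvi", "tex")),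
     ("dvilualatex", ("latex", "dvi", "luatex")), ("platex", ("latex", "dvi", "ptex")),
     ("uplatex", ("latex", "dvi", "uptex")), ("pdflatex", ("latex", "pdf", "tex")),
     ("lualatex", ("latex", "pdf", "luatex")), ("xelatex", ("latex", "pdf", "xetex"))]

-- _POSTPROCESS_INDEX = {pp.value: pp for pp in PostProcessType}
def ppIndexB : PySem.Dict String String :=
  PySem.Dict.mk   -- {pp.value: pp for pp in PostProcessType}: distinct keys, insertion order
    [("unknown", "unknown"), ("none", "none"),
     ("dvips_ps2pdf", "dvips_ps2pdf"), ("dvipdfmx", "dvipdfmx")]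

def compiler_string_to_types_alt (compiler : String) : String × String × String × String :=
  let parts := (PySem.Str.splitMax? compiler "+" 1).getD []
  let retP := if parts.length = 2 then PySem.Dict.getD ppIndexB (parts.getD 1 "") "unknown" else "none"
  let loe := PySem.Dict.getD compilerIndexB (parts.headD "") ("unknown", "unknown", "unknown")
  (loe.1, loe.2.1, loe.2.2, retP)

-- ===== PRECONDITION & SPEC =====
-- On inputs "comp+postp" whose suffix is "none", "dvips_ps2pdf", "dvipdfmx" or "PostProcessType."
-- followed by one of those, A's `str(pp) == postp` comparison (a str-Enum quirk: str(pp) is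
-- "PostProcessType.<name>") makes A return PostProcessType.unknown for the documented spellings
-- and match the "PostProcessType.<name>" spellings instead; B matches the member VALUE, the
-- intended spelling.
def D_compiler_string_to_types (compiler : String) : Prop :=
  ((PySem.Str.splitMax? compiler "+" 1).getD []).length = 2 ∧
    (let p := ((PySem.Str.splitMax? compiler "+" 1).getD []).getD 1 ""
     p = "none" ∨ p = "dvips_ps2pdf" ∨ p = "dvipdfmx" ∨
      p = "PostProcessType.none" ∨ p = "PostProcessType.dvips_ps2pdf" ∨ p = "PostProcessType.dvipdfmx")

instance (compiler : String) : Decidable (D_compiler_string_to_types compiler) := by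
  unfold D_compiler_string_to_types; infer_instance

def Spec_compiler_string_to_types (compiler : String) (out : String × String × String × String) : Prop :=
  ¬ D_compiler_string_to_types compiler → out = compiler_string_to_types_alt compiler

instance (compiler : String) (out : String × String × String × String) : Decidable (Spec_compiler_string_to_types compiler out) := by
  unfold Spec_compiler_string_to_types; infer_instance

def pvDiffWitness_compiler_string_to_types : String := "etex+none"

def pvDiffWitnessOut_compiler_string_to_types :
    (String × String × String × String) × (String × String × String × String) :=
  (("tex", "dvi", "tex", "unknown"), ("tex", "dvi", "tex", "none"))

-- ===== CLAIM (what is proved, stated in full; the proofs are below) =====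
def Claim_unchanged_compiler_string_to_types : Prop :=
  ∀ (compiler : String), Dom_compiler_string_to_types compiler →
    Spec_compiler_string_to_types compiler (compiler_string_to_types compiler)

def Claim_changed_compiler_string_to_types : Prop :=
  Dom_compiler_string_to_types (pvDiffWitness_compiler_string_to_types) ∧
  D_compiler_string_to_types (pvDiffWitness_compiler_string_to_types) ∧
  compiler_string_to_types (pvDiffWitness_compiler_string_to_types) = pvDiffWitnessOut_compiler_string_to_types.1 ∧
  compiler_string_to_types_alt (pvDiffWitness_compiler_string_to_types) = pvDiffWitnessOut_compiler_string_to_types.2 ∧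
  pvDiffWitnessOut_compiler_string_to_types.1 ≠ pvDiffWitnessOut_compiler_string_to_types.2

def Claim_exact_compiler_string_to_types : Prop :=
  ∀ (compiler : String), Dom_compiler_string_to_types compiler →
    D_compiler_string_to_types compiler →
    compiler_string_to_types compiler ≠ compiler_string_to_types_alt compiler

-- ===== LEMMAS AND PROOFS =====

-- the triple-nested scan of the table equals the flat reverse-index lookup
lemma scan_eq_lookup (comp : String) :
    langLoopA comp tableA ("unknown", "unknown", "unknown")
      = PySem.Dict.getD compilerIndexB comp ("unknown", "unknown", "unknown") := by
  by_cases h1 : comp = "etex"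
  · subst h1; decide
  by_cases h2 : comp = "dviluatex"
  · subst h2; decide
  by_cases h3 : comp = "ptex"
  · subst h3; decide
  by_cases h4 : comp = "uptex"
  · subst h4; decide
  by_cases h5 : comp = "pdfetex"
  · subst h5; decide
  by_cases h6 : comp = "luatex"
  · subst h6; decide
  by_cases h7 : comp = "xetex"
  · subst h7; decide
  by_cases h8 : comp = "latex"
  · subst h8; decide
  by_cases h9 : comp = "dvilualatex"
  · subst h9; decide
  by_cases h10 : comp = "platex"
  · subst h10; decide
  by_cases h11 : comp = "uplatex"
  · subst h11; decide
  by_cases h12 : comp = "pdflatex"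
  · subst h12; decide
  by_cases h13 : comp = "lualatex"
  · subst h13; decide
  by_cases h14 : comp = "xelatex"
  · subst h14; decide
  have b1 : ("etex" == comp) = false := beq_eq_false_iff_ne.mpr (Ne.symm h1)
  have b2 : ("dviluatex" == comp) = false := beq_eq_false_iff_ne.mpr (Ne.symm h2)
  have b3 : ("ptex" == comp) = false := beq_eq_false_iff_ne.mpr (Ne.symm h3)
  have b4 : ("uptex" == comp) = false := beq_eq_false_iff_ne.mpr (Ne.symm h4)
  have b5 : ("pdfetex" == comp) = false := beq_eq_false_iff_ne.mpr (Ne.symm h5)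
  have b6 : ("luatex" == comp) = false := beq_eq_false_iff_ne.mpr (Ne.symm h6)
  have b7 : ("xetex" == comp) = false := beq_eq_false_iff_ne.mpr (Ne.symm h7)
  have b8 : ("latex" == comp) = false := beq_eq_false_iff_ne.mpr (Ne.symm h8)
  have b9 : ("dvilualatex" == comp) = false := beq_eq_false_iff_ne.mpr (Ne.symm h9)
  have b10 : ("platex" == comp) = false := beq_eq_false_iff_ne.mpr (Ne.symm h10)
  have b11 : ("uplatex" == comp) = false := beq_eq_false_iff_ne.mpr (Ne.symm h11)
  have b12 : ("pdflatex" == comp) = false := beq_eq_false_iff_ne.mpr (Ne.symm h12)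
  have b13 : ("lualatex" == comp) = false := beq_eq_false_iff_ne.mpr (Ne.symm h13)
  have b14 : ("xelatex" == comp) = false := beq_eq_false_iff_ne.mpr (Ne.symm h14)
  simp [langLoopA, outLoopA, engLoopA, tableA, compilerIndexB, PySem.Dict.getD,
        PySem.Dict.get?, List.find?, h1, h2, h3, h4, h5, h6, h7, h8, h9, h10, h11, h12,
        h13, h14, b1, b2, b3, b4, b5, b6, b7, b8, b9, b10, b11, b12, b13, b14]

-- outside the difference region the two postprocess resolutions agree
lemma pp_eq_lookup (p : String) (n1 : p ≠ "none") (n2 : p ≠ "dvips_ps2pdf")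
    (n3 : p ≠ "dvipdfmx") (n4 : p ≠ "PostProcessType.none")
    (n5 : p ≠ "PostProcessType.dvips_ps2pdf") (n6 : p ≠ "PostProcessType.dvipdfmx") :
    ppLoopA p ppTableA = PySem.Dict.getD ppIndexB p "unknown" := by
  by_cases h1 : p = "unknown"
  · subst h1; decide
  by_cases h2 : p = "PostProcessType.unknown"
  · subst h2; decide
  have c1 : ("unknown" == p) = false := beq_eq_false_iff_ne.mpr (Ne.symm h1)
  have c2 : ("none" == p) = false := beq_eq_false_iff_ne.mpr (Ne.symm n1)
  have c3 : ("dvips_ps2pdf" == p) = false := beq_eq_false_iff_ne.mpr (Ne.symm n2)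
  have c4 : ("dvipdfmx" == p) = false := beq_eq_false_iff_ne.mpr (Ne.symm n3)
  simp [ppLoopA, ppTableA, ppIndexB, PySem.Dict.getD, PySem.Dict.get?, List.find?,
        Ne.symm h2, Ne.symm n4, Ne.symm n5, Ne.symm n6, c1, c2, c3, c4]

-- inside the difference region they always disagree
lemma pp_ne_lookup (p : String)
    (hp : p = "none" ∨ p = "dvips_ps2pdf" ∨ p = "dvipdfmx" ∨
          p = "PostProcessType.none" ∨ p = "PostProcessType.dvips_ps2pdf" ∨ p = "PostProcessType.dvipdfmx") :
    ppLoopA p ppTableA ≠ PySem.Dict.getD ppIndexB p "unknown" := by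
  rcases hp with rfl | rfl | rfl | rfl | rfl | rfl <;> decide

-- ===== VERDICT (by name: the statement is the Claim_ definition above) =====
theorem compiler_string_to_types_spec : Claim_unchanged_compiler_string_to_types := by
  intro compiler _
  unfold Spec_compiler_string_to_types
  intro hD
  unfold D_compiler_string_to_types at hD
  rcases h : (PySem.Str.splitMax? compiler "+" 1).getD [] with _ | ⟨c, _ | ⟨p, _ | ⟨q, rest⟩⟩⟩
  · simp [compiler_string_to_types, compiler_string_to_types_alt, h, scan_eq_lookup]
  · simp [compiler_string_to_types, compiler_string_to_types_alt, h, scan_eq_lookup]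
  · rw [h] at hD
    have hp : ¬(p = "none" ∨ p = "dvips_ps2pdf" ∨ p = "dvipdfmx" ∨
        p = "PostProcessType.none" ∨ p = "PostProcessType.dvips_ps2pdf" ∨ p = "PostProcessType.dvipdfmx") := by simpa using hD
    push Not at hp
    obtain ⟨n1, n2, n3, n4, n5, n6⟩ := hp
    simp [compiler_string_to_types, compiler_string_to_types_alt, h, scan_eq_lookup,
          pp_eq_lookup p n1 n2 n3 n4 n5 n6]
  · simp [compiler_string_to_types, compiler_string_to_types_alt, h, scan_eq_lookup]

theorem compiler_string_to_types_changed : Claim_changed_compiler_string_to_types := by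
  unfold Claim_changed_compiler_string_to_types; decide

theorem compiler_string_to_types_tight : Claim_exact_compiler_string_to_types := by
  intro compiler _ hD
  unfold D_compiler_string_to_types at hD
  obtain ⟨hlen, hmem⟩ := hD
  rcases h : (PySem.Str.splitMax? compiler "+" 1).getD [] with _ | ⟨c, _ | ⟨p, _ | ⟨q, rest⟩⟩⟩ <;>
    rw [h] at hlen hmem <;> simp at hlen
  intro hEq
  have h4 := congrArg (fun t : String × String × String × String => t.2.2.2) hEq
  simp [compiler_string_to_types, compiler_string_to_types_alt, h] at h4
  exact pp_ne_lookup p (by simpa using hmem) h4
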